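-- pv_equiv track=rewrite | github.com/KSLXY/casa0004_dissertation | reproducible_pipeline/run_pipeline.py | _scenario_feature_map
-- ===== SOURCE A (Python) =====
-- def _scenario_feature_map(all_cols: list[str]) -> dict[str, list[str]]:
--     cluster_cols = [c for c in all_cols if c.startswith("cluster_") or c == "cluster_id"]
--     neighbor_cols = [c for c in all_cols if c.startswith("neighbor_")]
--     event_cols = [
--         c
--         for c in all_cols
--         if c
--         in {
--             "is_public_holiday",
--             "is_school_break",
--             "is_major_event",
--             "event_weight",
--             "days_to_next_event",
--             "days_since_prev_event",
--         }
--     ]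
--
--     base_cols = [c for c in all_cols if c not in set(cluster_cols + neighbor_cols + event_cols)]
--
--     return {
--         "baseline_current_features": base_cols,
--         "cluster_only": base_cols + cluster_cols,
--         "neighbor_only": base_cols + neighbor_cols,
--         "events_only": base_cols + event_cols,
--         "full": base_cols + cluster_cols + neighbor_cols + event_cols,
--     }
-- ===== SOURCE B (Python) =====
-- def _scenario_feature_map(all_cols: list[str]) -> dict[str, list[str]]:
--     event_names = {
--         "is_public_holiday",
--         "is_school_break",
--         "is_major_event",
--         "event_weight",
--         "days_to_next_event",
--         "days_since_prev_event",
--     }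
--     base_cols, cluster_cols, neighbor_cols, event_cols = [], [], [], []
--     for c in all_cols:
--         if c.startswith("cluster_") or c == "cluster_id":
--             cluster_cols.append(c)
--         elif c.startswith("neighbor_"):
--             neighbor_cols.append(c)
--         elif c in event_names:
--             event_cols.append(c)
--         else:
--             base_cols.append(c)
--     return {
--         "baseline_current_features": base_cols,
--         "cluster_only": base_cols + cluster_cols,
--         "neighbor_only": base_cols + neighbor_cols,
--         "events_only": base_cols + event_cols,
--         "full": base_cols + cluster_cols + neighbor_cols + event_cols,
--     }
-- ===== Notes on version B (the rewrite author's own statement) =====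
-- stated objective: simpler
-- what changed: Replaces A's four filter comprehensions plus a set-difference pass (5 scans of all_cols and an intermediate set build) with a single classification loop assigning each column to exactly one of the four disjoint groups.
import Mathlib
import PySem

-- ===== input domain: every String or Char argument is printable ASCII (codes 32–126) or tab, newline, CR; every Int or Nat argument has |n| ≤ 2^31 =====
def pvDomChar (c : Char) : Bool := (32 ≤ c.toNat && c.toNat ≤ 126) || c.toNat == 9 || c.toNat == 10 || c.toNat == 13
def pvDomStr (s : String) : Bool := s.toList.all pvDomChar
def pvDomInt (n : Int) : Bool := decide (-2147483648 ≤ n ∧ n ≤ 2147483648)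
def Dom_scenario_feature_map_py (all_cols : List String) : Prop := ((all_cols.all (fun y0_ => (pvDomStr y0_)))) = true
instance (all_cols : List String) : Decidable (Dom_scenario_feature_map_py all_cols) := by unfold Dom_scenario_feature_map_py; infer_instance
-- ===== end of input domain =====

-- B replaces A's five scans of all_cols (four comprehensions plus a set-difference pass)
-- with one classification loop over disjoint categories; objective: simpler.


-- ===== PORT A =====
-- the event-name set literal and the three tests shared verbatim by both Pythons
def pvEventNames : List String :=
  ["is_public_holiday", "is_school_break", "is_major_event",
   "event_weight", "days_to_next_event", "days_since_prev_event"]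

def pCl (c : String) : Bool := PySem.Str.startswith c "cluster_" || c == "cluster_id"
def pNe (c : String) : Bool := PySem.Str.startswith c "neighbor_"
def pEv (c : String) : Bool := pvEventNames.contains c

def scenario_feature_map_py (all_cols : List String) : List (String × List String) :=
  let cluster_cols := all_cols.filter pCl
  let neighbor_cols := all_cols.filter pNe
  let event_cols := all_cols.filter pEv
  let excl := PySem.Set.ofList (cluster_cols ++ neighbor_cols ++ event_cols)
  let base_cols := all_cols.filter (fun c => !(PySem.Set.contains excl c))
  [("baseline_current_features", base_cols),
   ("cluster_only", base_cols ++ cluster_cols),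
   ("neighbor_only", base_cols ++ neighbor_cols),
   ("events_only", base_cols ++ event_cols),
   ("full", base_cols ++ cluster_cols ++ neighbor_cols ++ event_cols)]

-- ===== PORT B =====
-- one step of B's classification loop: append c to the group its if/elif chain selects
def pvClassify (st : List String × List String × List String × List String) (c : String) :
    List String × List String × List String × List String :=
  if pCl c then (st.1, st.2.1 ++ [c], st.2.2.1, st.2.2.2)
  else if pNe c then (st.1, st.2.1, st.2.2.1 ++ [c], st.2.2.2)
  else if pEv c then (st.1, st.2.1, st.2.2.1, st.2.2.2 ++ [c])
  else (st.1 ++ [c], st.2.1, st.2.2.1, st.2.2.2)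

def scenario_feature_map_py_alt (all_cols : List String) : List (String × List String) :=
  let st := all_cols.foldl pvClassify ([], [], [], [])
  let base_cols := st.1
  let cluster_cols := st.2.1
  let neighbor_cols := st.2.2.1
  let event_cols := st.2.2.2
  [("baseline_current_features", base_cols),
   ("cluster_only", base_cols ++ cluster_cols),
   ("neighbor_only", base_cols ++ neighbor_cols),
   ("events_only", base_cols ++ event_cols),
   ("full", base_cols ++ cluster_cols ++ neighbor_cols ++ event_cols)]

-- ===== PRECONDITION & SPEC =====
def Spec_scenario_feature_map_py (all_cols : List String) (out : List (String × List String)) : Prop := out = scenario_feature_map_py_alt all_cols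
instance (all_cols : List String) (out : List (String × List String)) : Decidable (Spec_scenario_feature_map_py all_cols out) := by unfold Spec_scenario_feature_map_py; infer_instance

-- ===== CLAIM (what is proved, stated in full; the proofs are below) =====
def Claim_equal_scenario_feature_map_py : Prop := ∀ (all_cols : List String), Dom_scenario_feature_map_py all_cols → Spec_scenario_feature_map_py all_cols (scenario_feature_map_py all_cols)

-- ===== LEMMAS AND PROOFS =====
-- the three categories are pairwise disjoint
lemma pCl_false_of_pNe (c : String) (h : pNe c = true) : pCl c = false := by
  rw [Bool.eq_false_iff]
  intro hc
  simp only [pNe, PySem.Str.startswith_eq, PySem.Chars.startswith_iff] at h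
  simp only [pCl, Bool.or_eq_true, beq_iff_eq, PySem.Str.startswith_eq,
    PySem.Chars.startswith_iff] at hc
  obtain ⟨t1, e1⟩ := h
  rcases hc with hc | hc
  · obtain ⟨t2, e2⟩ := hc
    rw [← e1] at e2; simp at e2
  · rw [hc] at e1; simp at e1

lemma pCl_pNe_false_of_pEv (c : String) (h : pEv c = true) :
    pCl c = false ∧ pNe c = false := by
  simp only [pEv, pvEventNames, List.contains_eq_mem, List.mem_cons, List.not_mem_nil,
    or_false, decide_eq_true_eq] at h
  rcases h with h | h | h | h | h | h <;> subst h <;> exact ⟨by decide, by decide⟩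

-- B's loop accumulates the four filters of its if/elif chain, in order
lemma foldl_classify (l : List String) (b0 c0 n0 e0 : List String) :
    l.foldl pvClassify (b0, c0, n0, e0) =
      (b0 ++ l.filter (fun c => !pCl c && !pNe c && !pEv c),
       c0 ++ l.filter pCl,
       n0 ++ l.filter (fun c => !pCl c && pNe c),
       e0 ++ l.filter (fun c => !pCl c && !pNe c && pEv c)) := by
  induction l generalizing b0 c0 n0 e0 with
  | nil => simp
  | cons x xs ih =>
    simp only [List.foldl_cons, List.filter_cons]
    by_cases hc : pCl x = true
    · simp [pvClassify, hc, ih]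
    · replace hc := Bool.eq_false_iff.mpr hc
      by_cases hn : pNe x = true
      · simp [pvClassify, hc, hn, ih]
      · replace hn := Bool.eq_false_iff.mpr hn
        by_cases he : pEv x = true
        · simp [pvClassify, hc, hn, he, ih]
        · replace he := Bool.eq_false_iff.mpr he
          simp [pvClassify, hc, hn, he, ih]

-- membership in the union of A's three filtered lists is the disjunction of the raw tests
lemma contains_excl (all_cols : List String) (c : String) (hm : c ∈ all_cols) :
    PySem.Set.contains
      (PySem.Set.ofList
        (all_cols.filter pCl ++ all_cols.filter pNe ++ all_cols.filter pEv)) c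
      = (pCl c || pNe c || pEv c) := by
  rcases Bool.eq_false_or_eq_true (pCl c || pNe c || pEv c) with h | h
  · rw [h]
    simp only [Bool.or_eq_true] at h
    simp only [PySem.Set.contains, List.contains_eq_mem, decide_eq_true_eq,
      PySem.Set.mem_ofList, List.mem_append, List.mem_filter]
    rcases h with (h | h) | h
    · exact Or.inl (Or.inl ⟨hm, h⟩)
    · exact Or.inl (Or.inr ⟨hm, h⟩)
    · exact Or.inr ⟨hm, h⟩
  · rw [h]
    simp only [Bool.or_eq_false_iff] at h
    simp [PySem.Set.contains, PySem.Set.mem_ofList, List.mem_filter, h.1.1, h.1.2, h.2]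

-- ===== VERDICT (by name: the statement is the Claim_ definition above) =====
theorem scenario_feature_map_py_spec : Claim_equal_scenario_feature_map_py := by
  intro all_cols _
  show _ = _
  simp only [scenario_feature_map_py, scenario_feature_map_py_alt]
  rw [foldl_classify]
  simp only [List.nil_append]
  have hNe : all_cols.filter (fun c => !pCl c && pNe c) = all_cols.filter pNe := by
    refine List.filter_congr (fun x _ => ?_)
    rcases Bool.eq_false_or_eq_true (pNe x) with h | h
    · simp [h, pCl_false_of_pNe x h]
    · simp [h]
  have hEv : all_cols.filter (fun c => !pCl c && !pNe c && pEv c)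
      = all_cols.filter pEv := by
    refine List.filter_congr (fun x _ => ?_)
    rcases Bool.eq_false_or_eq_true (pEv x) with h | h
    · obtain ⟨h1, h2⟩ := pCl_pNe_false_of_pEv x h
      simp [h, h1, h2]
    · simp [h]
  have hbase : all_cols.filter
        (fun c => !(PySem.Set.contains
          (PySem.Set.ofList (all_cols.filter pCl ++ all_cols.filter pNe ++ all_cols.filter pEv)) c))
      = all_cols.filter (fun c => !pCl c && !pNe c && !pEv c) := by
    refine List.filter_congr (fun x hx => ?_)
    rw [contains_excl all_cols x hx, Bool.not_or, Bool.not_or, Bool.and_assoc]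
  rw [hNe, hEv, hbase]
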